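-- pv_equiv track=rewrite | github.com/YC-Goh/YC-Goh.github.io | public/le_filter_project/_011_html_table_parser.py | _get_ordered_fieldnames
-- ===== SOURCE A (Python) =====
-- from typing import List, Dict, Any, Optional
--
-- def _get_ordered_fieldnames(data: List[Dict[str, Any]]) -> List[str]:
--     """Get ordered field names with priority fields first."""
--     if not data:
--         return []
--
--     # Get all unique keys
--     all_keys = set()
--     for record in data:
--         all_keys.update(record.keys())
--
--     # Define priority order
--     priority_fields = ['Name', 'Affix Type', 'Lvl', 'Reroll %']
--     ordered_fieldnames = []
--
--     # Add priority fields first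
--     for field in priority_fields:
--         if field in all_keys:
--             ordered_fieldnames.append(field)
--             all_keys.remove(field)
--
--     # Add remaining fields in sorted order
--     ordered_fieldnames.extend(sorted(all_keys))
--
--     return ordered_fieldnames
-- ===== SOURCE B (Python) =====
-- from typing import List, Dict, Any
--
--
-- def _get_ordered_fieldnames(data: List[Dict[str, Any]]) -> List[str]:
--     """Get ordered field names with priority fields first."""
--     priority_fields = ['Name', 'Affix Type', 'Lvl', 'Reroll %']
--     all_keys = {key for record in data for key in record}
--     return sorted(
--         all_keys,
--         key=lambda k: (priority_fields.index(k), '')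
--         if k in priority_fields
--         else (len(priority_fields), k),
--     )
-- ===== Notes on version B (the rewrite author's own statement) =====
-- stated objective: simpler
-- what changed: Replaces the two-phase ordering (loop over priority fields appending and removing from the key set, then extending with a sorted remainder) by one sorted() call over all keys with a composite ranking key (priority index first, alphabetical tail after), and drops the special-case empty-data return.
import Mathlib
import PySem

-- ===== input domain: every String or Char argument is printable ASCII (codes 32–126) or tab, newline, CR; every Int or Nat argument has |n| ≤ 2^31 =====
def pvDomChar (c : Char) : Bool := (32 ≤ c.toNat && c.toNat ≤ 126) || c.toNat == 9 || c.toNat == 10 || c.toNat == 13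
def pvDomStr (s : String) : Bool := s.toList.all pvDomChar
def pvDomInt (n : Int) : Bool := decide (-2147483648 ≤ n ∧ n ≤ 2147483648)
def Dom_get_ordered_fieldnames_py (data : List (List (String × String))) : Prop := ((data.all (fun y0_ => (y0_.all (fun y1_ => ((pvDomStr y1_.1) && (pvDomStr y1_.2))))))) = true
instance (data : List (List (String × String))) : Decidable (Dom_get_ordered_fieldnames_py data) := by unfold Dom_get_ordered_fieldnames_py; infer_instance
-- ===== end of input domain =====

-- B replaces A's two-phase ordering (append present priority fields while removing them
-- from the key set, then extend with the sorted remainder) by a single sorted() call over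
-- all keys with a composite ranking key; objective: simpler.

-- ===== PORT A =====
-- Python A: build all_keys as a set, append each present priority field and remove it
-- from the set, then extend with sorted(all_keys).  'all_keys.remove(field)' is guarded
-- by membership, so it is exactly PySem.Set.discard there.
def get_ordered_fieldnames_py (data : List (List (String × String))) : List String :=
  if data = [] then []
  else
    let all_keys : PySem.Set String :=
      data.foldl (fun s record => PySem.Set.update s (record.map Prod.fst)) PySem.Set.empty
    let priority_fields : List String := ["Name", "Affix Type", "Lvl", "Reroll %"]
    let st : List String × PySem.Set String :=
      priority_fields.foldl
        (fun st field =>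
          if PySem.Set.contains st.2 field then (st.1 ++ [field], PySem.Set.discard st.2 field)
          else st)
        ([], all_keys)
    st.1 ++ PySem.List.sorted st.2 (fun x => x) false

-- ===== PORT B =====
-- Python B: one sorted() over the key set with the tuple key
-- (priority_fields.index(k), '') if k in priority_fields else (len(priority_fields), k).
def get_ordered_fieldnames_py_alt (data : List (List (String × String))) : List String :=
  let priority_fields : List String := ["Name", "Affix Type", "Lvl", "Reroll %"]
  let all_keys : PySem.Set String :=
    data.foldl (fun s record => PySem.Set.update s (record.map Prod.fst)) PySem.Set.empty
  PySem.List.sorted2 all_keys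
    (fun k => if priority_fields.contains k then (((PySem.List.index? priority_fields k).getD 0 : Nat) : Int)
              else (priority_fields.length : Int))
    (fun k => if priority_fields.contains k then "" else k)
    false

-- ===== PRECONDITION & SPEC =====
def Spec_get_ordered_fieldnames_py (data : List (List (String × String))) (out : List String) : Prop := out = get_ordered_fieldnames_py_alt data
instance (data : List (List (String × String))) (out : List String) : Decidable (Spec_get_ordered_fieldnames_py data out) := by unfold Spec_get_ordered_fieldnames_py; infer_instance

-- ===== CLAIM (what is proved, stated in full; the proofs are below) =====
def Claim_equal_get_ordered_fieldnames_py : Prop := ∀ (data : List (List (String × String))), Dom_get_ordered_fieldnames_py data → Spec_get_ordered_fieldnames_py data (get_ordered_fieldnames_py data)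

-- ===== LEMMAS AND PROOFS =====

-- the shared key set both programs build
def pvKeys (data : List (List (String × String))) : PySem.Set String :=
  data.foldl (fun s record => PySem.Set.update s (record.map Prod.fst)) PySem.Set.empty

def pvPrio : List String := ["Name", "Affix Type", "Lvl", "Reroll %"]

-- rank of a key under B's composite ordering, and a single-string encoding of that
-- composite (rank, tail) key used only in the proofs
def pvRank (k : String) : Nat :=
  if k = "Name" then 0 else if k = "Affix Type" then 1
  else if k = "Lvl" then 2 else if k = "Reroll %" then 3 else 4

def pvKey (k : String) : String :=
  String.ofList (Char.ofNat (48 + pvRank k) :: (if pvRank k < 4 then [] else k.toList))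

lemma pvFold_nodup (l : List (List (String × String))) (s : PySem.Set String)
    (hs : s.Nodup) :
    (l.foldl (fun s record => PySem.Set.update s (record.map Prod.fst)) s).Nodup := by
  induction l generalizing s with
  | nil => exact hs
  | cons r t ih => exact ih _ (PySem.Set.nodup_update _ _ hs)

lemma pvKeys_nodup (data : List (List (String × String))) : (pvKeys data).Nodup := by
  exact pvFold_nodup data _ List.nodup_nil

lemma pvRank_le (k : String) : pvRank k ≤ 4 := by
  unfold pvRank; split_ifs <;> omega

lemma pvRank_lt_iff_mem (k : String) : pvRank k < 4 ↔ k ∈ pvPrio := by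
  unfold pvRank pvPrio
  split_ifs with h1 h2 h3 h4
  · simp [h1]
  · simp [h2]
  · simp [h3]
  · simp [h4]
  · simp [h1, h2, h3, h4]

lemma pvKey_lt_iff (a b : String) :
    pvKey a < pvKey b ↔
      (pvRank a < pvRank b ∨ (pvRank a = pvRank b ∧ pvRank a = 4 ∧ a.toList < b.toList)) := by
  have ha := pvRank_le a
  have hb := pvRank_le b
  unfold pvKey
  rw [String.lt_iff_toList_lt]
  simp only [String.toList_ofList, List.cons_lt_cons_iff]
  generalize pvRank a = ra at *
  generalize pvRank b = rb at *
  interval_cases ra <;> interval_cases rb <;>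
    simp_all

-- A's priority loop, characterised: appended fields are the present ones in field order,
-- and the final set is the original minus the priority fields.
lemma pvLoopA (fields : List String) (hf : fields.Nodup) (ord s : List String) :
    fields.foldl
      (fun (st : List String × PySem.Set String) field =>
        if PySem.Set.contains st.2 field then (st.1 ++ [field], PySem.Set.discard st.2 field)
        else st) (ord, s)
    = (ord ++ fields.filter (fun f => s.contains f), s.filter (fun x => !fields.contains x)) := by
  induction fields generalizing ord s with
  | nil => simp
  | cons f fs ih =>
    have hf' : fs.Nodup := hf.of_cons
    have hfmem : f ∉ fs := (List.nodup_cons.mp hf).1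
    by_cases h : PySem.Set.contains s f
    · have hfs : f ∈ s := (PySem.Set.contains_iff s f).mp h
      simp only [List.foldl_cons, if_pos h]
      rw [ih hf' (ord ++ [f]) (PySem.Set.discard s f)]
      simp only [Prod.mk.injEq]
      refine ⟨?_, ?_⟩
      · rw [List.filter_cons_of_pos (by simpa using h), List.append_assoc]
        simp only [List.singleton_append]
        congr 1
        congr 1
        apply List.filter_congr
        intro g hg
        have hgf : g ≠ f := fun hgf => hfmem (hgf ▸ hg)
        rw [Bool.eq_iff_iff]
        simp only [List.contains_iff_mem, PySem.Set.discard, List.mem_filter]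
        exact ⟨fun hx => hx.1, fun hx => ⟨hx, by simp [hgf]⟩⟩
      · simp only [PySem.Set.discard, List.filter_filter]
        apply List.filter_congr
        intro x _
        by_cases hxf : x = f <;> simp [hxf]
    · have hfs : f ∉ s := fun hm => h ((PySem.Set.contains_iff s f).mpr hm)
      simp only [List.foldl_cons, if_neg h]
      rw [ih hf' ord s]
      simp only [Prod.mk.injEq]
      refine ⟨?_, ?_⟩
      · rw [List.filter_cons_of_neg (by simpa using fun hm => hfs (List.contains_iff_mem.mp hm))]
      · apply List.filter_congr
        intro x hx
        have hxf : x ≠ f := fun hxf => hfs (hxf ▸ hx)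
        simp [hxf]

-- B's k1/k2 equal rank and the rank-guarded tail
lemma pvK1_eq (k : String) :
    (if pvPrio.contains k then (((PySem.List.index? pvPrio k).getD 0 : Nat) : Int)
     else (pvPrio.length : Int)) = (pvRank k : Int) := by
  unfold pvPrio pvRank
  by_cases h1 : k = "Name"
  · subst h1; decide
  by_cases h2 : k = "Affix Type"
  · subst h2; decide
  by_cases h3 : k = "Lvl"
  · subst h3; decide
  by_cases h4 : k = "Reroll %"
  · subst h4; decide
  simp [h1, h2, h3, h4]

lemma pvK2_eq (k : String) :
    (if pvPrio.contains k then "" else k) = (if pvRank k < 4 then "" else k) := by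
  have := pvRank_lt_iff_mem k
  by_cases h : k ∈ pvPrio
  · rw [if_pos (List.contains_iff_mem.mpr h), if_pos (this.mpr h)]
  · rw [if_neg (fun hc => h (List.contains_iff_mem.mp hc)),
      if_neg (fun hl => h (this.mp hl))]

-- B's composite comparator is exactly the pvKey comparator
lemma pvCmp_eq (a b : String) :
    (decide ((pvRank a : Int) < (pvRank b : Int)) ||
      (!decide ((pvRank b : Int) < (pvRank a : Int)) &&
        decide ((if pvRank a < 4 then "" else a) < (if pvRank b < 4 then "" else b))))
    = decide (pvKey a < pvKey b) := by
  have ha := pvRank_le a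
  have hb := pvRank_le b
  rcases lt_trichotomy (pvRank a) (pvRank b) with h | h | h
  · rw [decide_eq_true (by exact_mod_cast h),
      decide_eq_true ((pvKey_lt_iff a b).mpr (Or.inl h))]
    simp
  · have h1 : ¬ ((pvRank a : Int) < (pvRank b : Int)) := by omega
    have h2 : ¬ ((pvRank b : Int) < (pvRank a : Int)) := by omega
    rw [decide_eq_false h1, decide_eq_false h2]
    simp only [Bool.false_or, Bool.not_false, Bool.true_and]
    rw [Bool.eq_iff_iff, decide_eq_true_iff, decide_eq_true_iff, pvKey_lt_iff]
    by_cases h4 : pvRank a < 4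
    · rw [if_pos h4, if_pos (h ▸ h4)]
      constructor
      · intro hlt; exact absurd hlt (lt_irrefl _)
      · rintro (hlt | ⟨_, h44, _⟩)
        · omega
        · omega
    · have ha4 : pvRank a = 4 := by omega
      rw [if_neg h4, if_neg (by omega)]
      rw [String.lt_iff_toList_lt]
      constructor
      · intro hlt; exact Or.inr ⟨h, ha4, hlt⟩
      · rintro (hlt | ⟨_, _, hlt⟩)
        · omega
        · exact hlt
  · have h1 : ¬ ((pvRank a : Int) < (pvRank b : Int)) := by omega
    have h2 : ((pvRank b : Int) < (pvRank a : Int)) := by exact_mod_cast h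
    rw [decide_eq_false h1, decide_eq_true h2]
    simp only [Bool.not_true, Bool.false_and, Bool.false_or]
    symm
    rw [decide_eq_false (fun hlt => by
      rcases (pvKey_lt_iff a b).mp hlt with hlt' | ⟨heq, _, _⟩
      · omega
      · omega)]

-- ===== VERDICT (by name: the statement is the Claim_ definition above) =====
lemma pvPrio_pairwise : List.Pairwise (fun a b => pvKey a < pvKey b) pvPrio := by
  unfold pvPrio
  refine List.Pairwise.cons ?_ (List.Pairwise.cons ?_ (List.Pairwise.cons ?_
    (List.pairwise_singleton _ _)))
  all_goals intro b hb; fin_cases hb <;> exact (pvKey_lt_iff _ _).mpr (Or.inl (by decide))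

lemma pvRank_eq_four {k : String} (h : k ∉ pvPrio) : pvRank k = 4 := by
  have h1 := pvRank_lt_iff_mem k
  have h2 := pvRank_le k
  have h3 : ¬ pvRank k < 4 := fun hl => h (h1.mp hl)
  omega

lemma pvMemSorted_not_prio {K : List String} {a : String}
    (ha : a ∈ PySem.List.sorted (K.filter (fun x => !pvPrio.contains x)) (fun x => x) false) :
    a ∉ pvPrio := by
  have h := (PySem.List.mem_sorted _ _ _ _).mp ha
  simp only [List.mem_filter, Bool.not_eq_eq_eq_not, Bool.not_true] at h
  intro hm
  have h2 := h.2
  rw [List.contains_iff_mem.symm] at hm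
  rw [h2] at hm
  exact Bool.false_ne_true hm

lemma pvSorted_eq (K : List String) (hnd : K.Nodup) :
    PySem.List.sorted K pvKey false
    = pvPrio.filter (fun f => K.contains f)
      ++ PySem.List.sorted (K.filter (fun x => !pvPrio.contains x)) (fun x => x) false := by
  apply PySem.List.sorted_eq_of_perm_of_pairwise_lt
  · -- permutation
    have h1 : (pvPrio.filter (fun f => K.contains f)).Perm
        (K.filter (fun x => pvPrio.contains x)) := by
      rw [List.perm_ext_iff_of_nodup ((by decide : pvPrio.Nodup).filter _) (hnd.filter _)]
      intro x
      simp only [List.mem_filter, List.contains_iff_mem]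
      tauto
    have h2 := PySem.List.sorted_perm (K.filter (fun x => !pvPrio.contains x)) (fun x => x) false
    exact (h1.append h2).trans (List.filter_append_perm _ K)
  · -- pairwise strictly increasing under pvKey
    rw [List.pairwise_append]
    refine ⟨pvPrio_pairwise.sublist List.filter_sublist, ?_, ?_⟩
    · have hle := PySem.List.sorted_pairwise (K.filter (fun x => !pvPrio.contains x)) (fun x => x)
      have hnd2 : (PySem.List.sorted (K.filter (fun x => !pvPrio.contains x)) (fun x => x) false).Nodup :=
        (PySem.List.sorted_perm (K.filter (fun x => !pvPrio.contains x)) (fun x => x) false).nodup_iff.mpr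
          (hnd.filter _)
      refine (hle.and hnd2).imp_of_mem ?_
      intro a b ha hb hab
      have ha' : a ∉ pvPrio := pvMemSorted_not_prio ha
      have hb' : b ∉ pvPrio := pvMemSorted_not_prio hb
      refine (pvKey_lt_iff a b).mpr (Or.inr ⟨?_, pvRank_eq_four ha', ?_⟩)
      · rw [pvRank_eq_four ha', pvRank_eq_four hb']
      · exact String.lt_iff_toList_lt.mp (lt_of_le_of_ne hab.1 hab.2)
    · intro a ha b hb
      have ha' : a ∈ pvPrio := (List.mem_filter.mp ha).1
      have hb' : b ∉ pvPrio := pvMemSorted_not_prio hb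
      refine (pvKey_lt_iff a b).mpr (Or.inl ?_)
      have := (pvRank_lt_iff_mem a).mpr ha'
      rw [pvRank_eq_four hb']
      exact this

lemma pvBridge (K : List String) :
    PySem.List.sorted2 K
      (fun k => if pvPrio.contains k then (((PySem.List.index? pvPrio k).getD 0 : Nat) : Int)
                else (pvPrio.length : Int))
      (fun k => if pvPrio.contains k then "" else k) false
    = PySem.List.sorted K pvKey false := by
  have h1 : (fun k => if pvPrio.contains k then (((PySem.List.index? pvPrio k).getD 0 : Nat) : Int)
      else (pvPrio.length : Int)) = fun k => (pvRank k : Int) := funext pvK1_eq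
  have h2 : (fun k => if pvPrio.contains k then "" else k)
      = fun k => (if pvRank k < 4 then "" else k) := funext pvK2_eq
  rw [h1, h2]
  simp only [PySem.List.sorted2, PySem.List.sorted, Bool.false_eq_true, if_false]
  have hc : (fun a b : String =>
      decide ((pvRank a : Int) < (pvRank b : Int)) ||
        (!decide ((pvRank b : Int) < (pvRank a : Int)) &&
          decide ((if pvRank a < 4 then "" else a) < (if pvRank b < 4 then "" else b))))
      = fun a b : String => decide (pvKey a < pvKey b) :=
    funext fun a => funext fun b => pvCmp_eq a b
  rw [hc]

theorem get_ordered_fieldnames_py_spec : Claim_equal_get_ordered_fieldnames_py := by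
  intro data _
  unfold Spec_get_ordered_fieldnames_py get_ordered_fieldnames_py get_ordered_fieldnames_py_alt
  dsimp only
  by_cases hd : data = []
  · subst hd; rfl
  · rw [if_neg hd]
    have hkeys : data.foldl (fun s record => PySem.Set.update s (record.map Prod.fst))
        PySem.Set.empty = pvKeys data := rfl
    rw [hkeys]
    rw [show (["Name", "Affix Type", "Lvl", "Reroll %"] : List String) = pvPrio from rfl]
    rw [pvLoopA pvPrio (by decide) [] (pvKeys data)]
    rw [pvBridge (pvKeys data), pvSorted_eq (pvKeys data) (pvKeys_nodup data)]
    simp
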